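-- pv_equiv track=rewrite | github.com/kubeflow/pipelines | sdk/python/kfp/local/subprocess_task_handler.py | replace_python_executable
-- ===== SOURCE A (Python) =====
-- from typing import List
--
-- def replace_python_executable(full_command: List[str],
--                               new_executable: str) -> List[str]:
--     """Replaces the 'python3' string in each element of the full_command with
--     the new_executable. It does not replace the python executable in the user
--     code.
--
--     Args:
--         full_command: Commands and args.
--         new_executable: The Python executable to use for local execution.
--
--     Returns:
--         The updated commands and args.
--     """
--     user_code_index = None
--     new_full_command = []
--
--     for i, el in enumerate(full_command):
--         if user_code_index is None and '"$program_path/ephemeral_component.py"' in el and '"$@"' in el: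
--             user_code_index = i + 1
--
--         if i != user_code_index:
--             new_full_command.append(el.replace('python3', f'{new_executable}'))
--         else:
--             # It's important to skip the user code so we don't errantly replace the Jupyter Notebook kernel name.
--             new_full_command.append(el)
--
--     return new_full_command
-- ===== SOURCE B (Python) =====
-- def replace_python_executable(full_command, new_executable):
--     """Replace 'python3' in command elements, keeping the user-code element intact."""
--     def sub(el):
--         return el.replace('python3', new_executable)
--
--     for i, el in enumerate(full_command):
--         if '"$program_path/ephemeral_component.py"' in el and '"$@"' in el:
--             tail = full_command[i + 1:]
--             # splice: mapped prefix (through the marker), untouched user code, mapped suffix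
--             return ([sub(e) for e in full_command[:i + 1]]
--                     + tail[:1]
--                     + [sub(e) for e in tail[1:]])
--     return [sub(e) for e in full_command]
-- ===== Notes on version B (the rewrite author's own statement) =====
-- stated objective: simpler
-- what changed: B builds the result by list splicing: on the first marker match it returns mapped-prefix + untouched user-code element + mapped-suffix via slices, and only maps when no marker exists, instead of A's single loop threading an Optional user_code_index and testing it at every element.
import Mathlib
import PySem

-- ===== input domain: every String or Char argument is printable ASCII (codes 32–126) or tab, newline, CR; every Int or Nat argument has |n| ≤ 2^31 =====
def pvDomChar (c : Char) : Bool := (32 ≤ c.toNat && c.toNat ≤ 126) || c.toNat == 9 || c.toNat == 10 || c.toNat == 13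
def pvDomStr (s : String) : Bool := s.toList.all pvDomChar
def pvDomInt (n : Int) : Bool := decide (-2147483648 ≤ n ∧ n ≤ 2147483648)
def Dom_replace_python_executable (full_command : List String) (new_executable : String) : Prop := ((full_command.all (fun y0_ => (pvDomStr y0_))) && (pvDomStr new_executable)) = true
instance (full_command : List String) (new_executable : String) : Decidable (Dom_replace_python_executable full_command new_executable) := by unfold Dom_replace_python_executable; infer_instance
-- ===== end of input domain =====

-- B splices three slices around the protected user-code element (objective: simpler); A threads an Optional index through one stateful loop.

-- shared literal test: '"$program_path/ephemeral_component.py"' in el and '"$@"' in el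
def pvIsUserCode (el : String) : Bool :=
  PySem.Str.isIn "\"$program_path/ephemeral_component.py\"" el && PySem.Str.isIn "\"$@\"" el

def pvSub (ne el : String) : String := PySem.Str.replace el "python3" ne

-- ===== PORT A =====
-- A's for-loop as structural recursion carrying the index i and user_code_index
def pvGoA (ne : String) : Int → Option Int → List String → List String
  | _, _, [] => []
  | i, uci, el :: rest =>
    let uci' := if uci = none ∧ pvIsUserCode el = true then some (i + 1) else uci
    let cur := if some i ≠ uci' then pvSub ne el else el
    cur :: pvGoA ne (i + 1) uci' rest

def replace_python_executable (full_command : List String) (new_executable : String) : List String :=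
  pvGoA new_executable 0 none full_command

-- ===== PORT B =====
-- Source B's first-match index scan is List.findIdx?; its nonnegative in-bounds slices are take/drop (exact there)
def replace_python_executable_alt (full_command : List String) (new_executable : String) : List String :=
  match full_command.findIdx? pvIsUserCode with
  | none => full_command.map (pvSub new_executable)
  | some i =>
      let tail := full_command.drop (i + 1)
      (full_command.take (i + 1)).map (pvSub new_executable)
        ++ tail.take 1
        ++ (tail.drop 1).map (pvSub new_executable)

-- ===== PRECONDITION & SPEC =====
def Spec_replace_python_executable (full_command : List String) (new_executable : String) (out : List String) : Prop := out = replace_python_executable_alt full_command new_executable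
instance (full_command : List String) (new_executable : String) (out : List String) : Decidable (Spec_replace_python_executable full_command new_executable out) := by unfold Spec_replace_python_executable; infer_instance

-- ===== CLAIM (what is proved, stated in full; the proofs are below) =====
def Claim_equal_replace_python_executable : Prop := ∀ (full_command : List String) (new_executable : String), Dom_replace_python_executable full_command new_executable → Spec_replace_python_executable full_command new_executable (replace_python_executable full_command new_executable)

-- ===== LEMMAS AND PROOFS =====

-- once user_code_index is strictly behind the cursor it never matches again: everything is replaced
theorem pvGoA_past (ne : String) (xs : List String) : ∀ (i k : Int), k < i →
    pvGoA ne i (some k) xs = xs.map (pvSub ne) := by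
  induction xs with
  | nil => intro i k _; simp [pvGoA]
  | cons el rest ih =>
    intro i k hk
    have hne : some i ≠ some k := by simp; omega
    simp [pvGoA, hne, ih (i + 1) k (by omega)]

-- when user_code_index equals the cursor: keep the head, replace the rest
theorem pvGoA_here (ne : String) (xs : List String) (i : Int) :
    pvGoA ne i (some i) xs = xs.take 1 ++ (xs.drop 1).map (pvSub ne) := by
  cases xs with
  | nil => simp [pvGoA]
  | cons el rest => simp [pvGoA, pvGoA_past ne rest (i + 1) i (by omega)]

-- before any match, A's loop produces exactly B's three-slice splice (the cursor i is irrelevant)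
theorem pvGoA_none (ne : String) (xs : List String) : ∀ (i : Int),
    pvGoA ne i none xs =
      match xs.findIdx? pvIsUserCode with
      | none => xs.map (pvSub ne)
      | some n =>
          (xs.take (n + 1)).map (pvSub ne)
            ++ (xs.drop (n + 1)).take 1
            ++ ((xs.drop (n + 1)).drop 1).map (pvSub ne) := by
  induction xs with
  | nil => intro i; simp [pvGoA]
  | cons el rest ih =>
    intro i
    by_cases h : pvIsUserCode el = true
    · have hne : some i ≠ some (i + 1) := by simp
      simp [pvGoA, h, hne, pvGoA_here, List.findIdx?_cons]
    · cases hf : rest.findIdx? pvIsUserCode with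
      | none => simp [pvGoA, h, ih, hf, List.findIdx?_cons]
      | some n => simp [pvGoA, h, ih, hf, List.findIdx?_cons]

-- ===== VERDICT (by name: the statement is the Claim_ definition above) =====
theorem replace_python_executable_spec : Claim_equal_replace_python_executable := by
  intro fc ne _
  show replace_python_executable fc ne = replace_python_executable_alt fc ne
  unfold replace_python_executable replace_python_executable_alt
  rw [pvGoA_none]
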